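-- pv_equiv track=rewrite | github.com/PlaviAjvar/Logic-Minimization | logic_optimization.py | second_layer
-- ===== SOURCE A (Python) =====
-- inf = 10 ** 18  # artificial infinity, larger than any feasible length of expression
--
-- def minimize_util(low_idx, high_idx, min_op, backtrack, adv_flag):
--     # base case
--     if low_idx == high_idx:
--         return min_op[low_idx][high_idx]
--     # if we've already calculated the value
--     if min_op[low_idx][high_idx] != inf:
--         return min_op[low_idx][high_idx]
--
--     for split_point in range(low_idx, high_idx):
--         left_cost = 2 * minimize_util(low_idx, split_point, min_op, backtrack, adv_flag) + 1
--         # if one of the operands is a first layer problem, and we can exploit negation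
--         # then half the nands/nors dissapear, and we use it only once since there is no need to set A' = A op A
--         # special case when left operand is a single variable and we cant exploit this feature
--         if left_cost != 1 and low_idx == split_point and adv_flag:
--             left_cost = left_cost // 4
--
--         right_cost = 2 * minimize_util(split_point + 1, high_idx, min_op, backtrack, adv_flag) + 1
--         if right_cost != 1 and split_point + 1 == high_idx and adv_flag:
--             right_cost = right_cost // 4
--
--         # calculate minimal cost for split at split point
--         split_cost = left_cost + right_cost + 1
--         # if found better solution, update
--         if split_cost < min_op[low_idx][high_idx]:
--             min_op[low_idx][high_idx] = split_cost
--             backtrack[low_idx][high_idx] = split_point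
--
--     return min_op[low_idx][high_idx]
--
-- def second_layer(cost, is_nand, is_dnf):
--     num_var = len(cost)
--     # minimal number of NANDs/NORs to represent segment in disjunctive/conjuctive form
--     min_op = [[inf] * num_var for i in range(num_var)]
--     backtrack = [[-1] * num_var for i in range(num_var)]  # store optimal splitting point of each segment
--     # base cases
--     for i in range(num_var):
--         min_op[i][i] = cost[i]  # minimal cost of conjuction/disjunction in disjunctive/conjuctive form
--         backtrack[i][i] = i
--
--     minimize_util(0, num_var - 1, min_op, backtrack, (is_nand == is_dnf))
--     return backtrack, min_op
-- ===== SOURCE B (Python) =====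
-- inf = 10 ** 18  # artificial infinity, larger than any feasible length of expression
--
-- def second_layer(cost, is_nand, is_dnf):
--     # bottom-up interval DP: fill tables by increasing interval length instead of memoized recursion
--     num_var = len(cost)
--     adv_flag = (is_nand == is_dnf)
--     min_op = [[inf] * num_var for _ in range(num_var)]
--     backtrack = [[-1] * num_var for _ in range(num_var)]
--     for i in range(num_var):
--         min_op[i][i] = cost[i]
--         backtrack[i][i] = i
--     for length in range(2, num_var + 1):
--         for i in range(num_var - length + 1):
--             j = i + length - 1
--             best, arg = inf, -1
--             for k in range(i, j):
--                 left_cost = 2 * min_op[i][k] + 1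
--                 if left_cost != 1 and i == k and adv_flag:
--                     left_cost //= 4
--                 right_cost = 2 * min_op[k + 1][j] + 1
--                 if right_cost != 1 and k + 1 == j and adv_flag:
--                     right_cost //= 4
--                 split_cost = left_cost + right_cost + 1
--                 if split_cost < best:
--                     best, arg = split_cost, k
--             min_op[i][j] = best
--             backtrack[i][j] = arg
--     return backtrack, min_op
-- ===== Notes on version B (the rewrite author's own statement) =====
-- stated objective: alternative
-- what changed: Replaces the top-down memoized recursive helper (minimize_util recursing over splits with a memo table) by a bottom-up iterative interval DP that fills min_op/backtrack by increasing interval length with three nested loops.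
import Mathlib
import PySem

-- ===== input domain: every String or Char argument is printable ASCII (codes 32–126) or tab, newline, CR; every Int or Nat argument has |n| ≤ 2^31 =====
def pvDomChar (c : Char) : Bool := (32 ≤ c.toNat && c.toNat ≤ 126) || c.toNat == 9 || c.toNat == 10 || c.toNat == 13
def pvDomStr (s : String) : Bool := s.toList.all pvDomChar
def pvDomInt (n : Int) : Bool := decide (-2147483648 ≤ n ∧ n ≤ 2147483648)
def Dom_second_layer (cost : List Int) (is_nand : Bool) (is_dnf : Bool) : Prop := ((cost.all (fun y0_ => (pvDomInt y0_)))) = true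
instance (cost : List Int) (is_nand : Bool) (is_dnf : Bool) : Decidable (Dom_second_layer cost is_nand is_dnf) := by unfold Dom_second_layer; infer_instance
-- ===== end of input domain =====

-- B replaces A's memoized recursive helper by a bottom-up interval-DP fill (loop over interval
-- lengths); return value only, A = B on every non-empty cost list (A raises IndexError on []).


-- ===== PORT A =====
def pvInf : Int := 10 ^ 18

-- m[i][j] ; exact where both indexes are in range (the only reads under Pre_)
def tget (m : List (List Int)) (i j : Int) : Int :=
  PySem.List.pyGetD (PySem.List.pyGetD m i []) j 0

-- m[i][j] = v ; exact for in-range non-negative indexes (the only writes under Pre_)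
def tset (m : List (List Int)) (i j : Int) (v : Int) : List (List Int) :=
  m.set i.toNat ((m.getD i.toNat []).set j.toNat v)

-- literal port of minimize_util; the loop body is the named helper minimize_util_step;
-- fuel only makes the recursion structural (with fuel ≥ high - low, as second_layer
-- supplies, the fuel-0 branch is never reached)
mutual
def minimize_util (fuel : Nat) (low_idx high_idx : Int)
    (min_op backtrack : List (List Int)) (adv_flag : Bool) :
    Int × (List (List Int) × List (List Int)) :=
  if low_idx = high_idx then (tget min_op low_idx high_idx, (min_op, backtrack))
  else if tget min_op low_idx high_idx ≠ pvInf then (tget min_op low_idx high_idx, (min_op, backtrack))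
  else match fuel with
  | 0 => (tget min_op low_idx high_idx, (min_op, backtrack))
  | f + 1 =>
    let st := (PySem.List.pyRange low_idx high_idx 1).foldl
      (fun s split_point => minimize_util_step f low_idx high_idx adv_flag s split_point)
      (min_op, backtrack)
    (tget st.1 low_idx high_idx, st)
termination_by 2 * fuel
decreasing_by all_goals omega

def minimize_util_step (f : Nat) (low_idx high_idx : Int) (adv_flag : Bool)
    (s : List (List Int) × List (List Int)) (split_point : Int) :
    List (List Int) × List (List Int) :=
  let rl := minimize_util f low_idx split_point s.1 s.2 adv_flag
  let left0 := 2 * rl.1 + 1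
  let left_cost := if left0 ≠ 1 ∧ low_idx = split_point ∧ adv_flag = true
                   then PySem.Int.floordiv left0 4 else left0
  let rr := minimize_util f (split_point + 1) high_idx rl.2.1 rl.2.2 adv_flag
  let right0 := 2 * rr.1 + 1
  let right_cost := if right0 ≠ 1 ∧ split_point + 1 = high_idx ∧ adv_flag = true
                    then PySem.Int.floordiv right0 4 else right0
  let split_cost := left_cost + right_cost + 1
  if split_cost < tget rr.2.1 low_idx high_idx
  then (tset rr.2.1 low_idx high_idx split_cost, tset rr.2.2 low_idx high_idx split_point)
  else (rr.2.1, rr.2.2)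
termination_by 2 * f + 1
decreasing_by all_goals omega
end

def second_layer (cost : List Int) (is_nand : Bool) (is_dnf : Bool) :
    List (List Int) × List (List Int) :=
  let num_var := cost.length
  let min_op := (List.range num_var).map (fun _ => List.replicate num_var pvInf)
  let backtrack := (List.range num_var).map (fun _ => List.replicate num_var (-1 : Int))
  let st := (List.range num_var).foldl
    (fun (s : List (List Int) × List (List Int)) (i : Nat) =>
      (tset s.1 (i : Int) (i : Int) (PySem.List.pyGetD cost (i : Int) 0),
       tset s.2 (i : Int) (i : Int) (i : Int)))
    (min_op, backtrack)
  let r := minimize_util num_var 0 ((num_var : Int) - 1) st.1 st.2 (is_nand == is_dnf)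
  (r.2.2, r.2.1)

-- ===== PORT B =====
def second_layer_alt (cost : List Int) (is_nand : Bool) (is_dnf : Bool) :
    List (List Int) × List (List Int) :=
  let num_var := cost.length
  let adv_flag := (is_nand == is_dnf)
  let min_op := (List.range num_var).map (fun _ => List.replicate num_var pvInf)
  let backtrack := (List.range num_var).map (fun _ => List.replicate num_var (-1 : Int))
  let st0 := (List.range num_var).foldl
    (fun (s : List (List Int) × List (List Int)) (i : Nat) =>
      (tset s.1 (i : Int) (i : Int) (PySem.List.pyGetD cost (i : Int) 0),
       tset s.2 (i : Int) (i : Int) (i : Int)))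
    (min_op, backtrack)
  let st := (PySem.List.pyRange 2 ((num_var : Int) + 1) 1).foldl
    (fun (s : List (List Int) × List (List Int)) len =>
      (PySem.List.pyRange 0 ((num_var : Int) - len + 1) 1).foldl
        (fun (s : List (List Int) × List (List Int)) i =>
          let j := i + len - 1
          let ba := (PySem.List.pyRange i j 1).foldl
            (fun (ba : Int × Int) k =>
              let left0 := 2 * tget s.1 i k + 1
              let left_cost := if left0 ≠ 1 ∧ i = k ∧ adv_flag = true
                               then PySem.Int.floordiv left0 4 else left0
              let right0 := 2 * tget s.1 (k + 1) j + 1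
              let right_cost := if right0 ≠ 1 ∧ k + 1 = j ∧ adv_flag = true
                                then PySem.Int.floordiv right0 4 else right0
              let split_cost := left_cost + right_cost + 1
              if split_cost < ba.1 then (split_cost, k) else ba)
            (pvInf, -1)
          (tset s.1 i j ba.1, tset s.2 i j ba.2))
        s)
    st0
  (st.2, st.1)

-- ===== PRECONDITION & SPEC =====
-- Pre_ excludes only the empty cost list, on which A raises IndexError.
def Pre_second_layer (cost : List Int) (is_nand : Bool) (is_dnf : Bool) : Prop := cost ≠ []
instance (cost : List Int) (is_nand : Bool) (is_dnf : Bool) : Decidable (Pre_second_layer cost is_nand is_dnf) := by unfold Pre_second_layer; infer_instance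
def pvWitness_second_layer : List Int × Bool × Bool := ([2, 1, 3], true, false)

def Spec_second_layer (cost : List Int) (is_nand : Bool) (is_dnf : Bool) (out : List (List Int) × List (List Int)) : Prop := out = second_layer_alt cost is_nand is_dnf
instance (cost : List Int) (is_nand : Bool) (is_dnf : Bool) (out : List (List Int) × List (List Int)) : Decidable (Spec_second_layer cost is_nand is_dnf out) := by unfold Spec_second_layer; infer_instance

-- ===== CLAIM (what is proved, stated in full; the proofs are below) =====
def Claim_equal_second_layer : Prop := ∀ (cost : List Int) (is_nand : Bool) (is_dnf : Bool), Dom_second_layer cost is_nand is_dnf → Pre_second_layer cost is_nand is_dnf → Spec_second_layer cost is_nand is_dnf (second_layer cost is_nand is_dnf)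

-- ===== LEMMAS AND PROOFS =====

-- table cell m[p][q] for Nat indexes
def cellT (m : List (List Int)) (p q : Nat) : Int := (m.getD p []).getD q 0
-- n × n table
def shapeN (m : List (List Int)) (n : Nat) : Prop := m.length = n ∧ ∀ r ∈ m, r.length = n

lemma tget_nat (m : List (List Int)) (p q : Nat) :
    tget m (p : Int) (q : Int) = cellT m p q := by
  simp [tget, cellT]

lemma tset_nat (m : List (List Int)) (p q : Nat) (v : Int) :
    tset m (p : Int) (q : Int) v = m.set p ((m.getD p []).set q v) := by
  simp [tset]

lemma shapeN_set {m : List (List Int)} {n p q : Nat} (hm : shapeN m n) (v : Int) :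
    shapeN (m.set p ((m.getD p []).set q v)) n := by
  obtain ⟨h1, h2⟩ := hm
  by_cases hp : p < m.length
  · refine ⟨by simp [h1], fun r hr => ?_⟩
    rcases List.mem_or_eq_of_mem_set hr with h | h
    · exact h2 r h
    · subst h
      rw [List.length_set, List.getD_eq_getElem m [] hp]
      exact h2 _ (List.getElem_mem hp)
  · rw [List.set_eq_of_length_le (by omega)]
    exact ⟨h1, h2⟩

lemma cellT_set_self {m : List (List Int)} {n p q : Nat} (hm : shapeN m n)
    (hp : p < n) (hq : q < n) (v : Int) :
    cellT (m.set p ((m.getD p []).set q v)) p q = v := by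
  obtain ⟨h1, h2⟩ := hm
  have hp' : p < m.length := by omega
  have hrowlen : (m.getD p []).length = n := by
    rw [List.getD_eq_getElem m [] hp']; exact h2 _ (List.getElem_mem hp')
  simp only [cellT, List.getD_eq_getElem?_getD]
  rw [List.getElem?_set_self (by simpa using hp')]
  simp only [Option.getD_some]
  rw [List.getElem?_set_self (by rw [List.getD_eq_getElem?_getD] at hrowlen; omega)]
  simp

lemma cellT_set_ne {m : List (List Int)} {p q p' q' : Nat} (v : Int)
    (hne : ¬(p' = p ∧ q' = q)) :
    cellT (m.set p ((m.getD p []).set q v)) p' q' = cellT m p' q' := by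
  by_cases hp : p' = p
  · subst hp
    have hq : q' ≠ q := fun h => hne ⟨rfl, h⟩
    by_cases hlt : p' < m.length
    · simp only [cellT, List.getD_eq_getElem?_getD]
      rw [List.getElem?_set_self (by simpa using hlt)]
      simp only [Option.getD_some]
      rw [List.getElem?_set_ne (Ne.symm hq)]
    · rw [List.set_eq_of_length_le (by omega)]
  · simp only [cellT, List.getD_eq_getElem?_getD]
    rw [List.getElem?_set_ne (fun h => hp h.symm)]

lemma cellT_const {n p q : Nat} (v : Int) (hp : p < n) (hq : q < n) :
    cellT ((List.range n).map (fun _ => List.replicate n v)) p q = v := by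
  simp [cellT, List.getD_eq_getElem?_getD, List.getElem?_replicate, hp, hq]

lemma shapeN_const (n : Nat) (v : Int) :
    shapeN ((List.range n).map (fun _ => List.replicate n v)) n := by
  refine ⟨by simp, fun r hr => ?_⟩
  simp only [List.mem_map] at hr
  obtain ⟨_, _, h⟩ := hr
  simp [← h]

-- the common DP recurrence: one split step of the interval minimum
def mstep (cost : List Int) (adv : Bool) (l h : Nat) (v : Nat → Nat → Int)
    (s : Int × Int) (k : Nat) : Int × Int :=
  let left0 := 2 * v l k + 1
  let left_cost := if left0 ≠ 1 ∧ (l : Int) = (k : Int) ∧ adv = true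
                   then PySem.Int.floordiv left0 4 else left0
  let right0 := 2 * v (k + 1) h + 1
  let right_cost := if right0 ≠ 1 ∧ (k : Int) + 1 = (h : Int) ∧ adv = true
                    then PySem.Int.floordiv right0 4 else right0
  if left_cost + right_cost + 1 < s.1 then (left_cost + right_cost + 1, (k : Int)) else s

def mbF (cost : List Int) (adv : Bool) : Nat → Nat → Nat → Int × Int
  | 0, l, _ => (cost.getD l 0, (l : Int))
  | f + 1, l, h =>
    if h ≤ l then (cost.getD l 0, (l : Int))
    else (List.range' l (h - l)).foldl
      (mstep cost adv l h (fun a b => (mbF cost adv f a b).1)) (pvInf, -1)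

-- (mbV cost adv l h) = (value, backtrack) of interval [l,h]
def mbV (cost : List Int) (adv : Bool) (l h : Nat) : Int × Int := mbF cost adv (h - l) l h

def stepC (cost : List Int) (adv : Bool) (l h : Nat) : (Int × Int) → Nat → Int × Int :=
  mstep cost adv l h (fun a b => (mbV cost adv a b).1)

lemma mbV_diag (cost : List Int) (adv : Bool) (l : Nat) :
    mbV cost adv l l = (cost.getD l 0, (l : Int)) := by
  simp [mbV, mbF]

lemma mbF_mono (cost : List Int) (adv : Bool) :
    ∀ f l h, h - l ≤ f → mbF cost adv f l h = mbV cost adv l h := by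
  intro f
  induction f using Nat.strong_induction_on with
  | _ f IH =>
    intro l h hle
    match f with
    | 0 =>
      have h0 : h - l = 0 := by omega
      show mbF cost adv 0 l h = mbF cost adv (h - l) l h
      rw [h0]
    | g + 1 =>
      by_cases hb : h ≤ l
      · have h0 : h - l = 0 := by omega
        show mbF cost adv (g + 1) l h = mbF cost adv (h - l) l h
        rw [h0]
        simp [mbF, hb]
      · push_neg at hb
        obtain ⟨e, he⟩ : ∃ e, h - l = e + 1 := ⟨h - l - 1, by omega⟩
        show mbF cost adv (g + 1) l h = mbF cost adv (h - l) l h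
        rw [he]
        simp only [mbF, if_neg (by omega : ¬ h ≤ l)]
        apply PySem.List.foldl_congr_mem
        intro acc k hk
        rw [List.mem_range'_1] at hk
        have hkl : l ≤ k := hk.1
        have hkh : k < h := by omega
        simp only [mstep]
        rw [IH g (by omega) l k (by omega), IH e (by omega) l k (by omega),
            IH g (by omega) (k + 1) h (by omega), IH e (by omega) (k + 1) h (by omega)]

lemma mbV_eq_fold (cost : List Int) (adv : Bool) {l h : Nat} (hlh : l < h) :
    mbV cost adv l h = (List.range' l (h - l)).foldl (stepC cost adv l h) (pvInf, -1) := by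
  obtain ⟨e, he⟩ : ∃ e, h - l = e + 1 := ⟨h - l - 1, by omega⟩
  show mbF cost adv (h - l) l h = _
  conv_lhs => rw [he]
  simp only [mbF, if_neg (by omega : ¬ h ≤ l)]
  apply PySem.List.foldl_congr_mem
  intro acc k hk
  rw [List.mem_range'_1] at hk
  simp only [mstep, stepC]
  rw [mbF_mono cost adv e l k (by omega), mbF_mono cost adv e (k + 1) h (by omega)]

lemma stepC_pres (cost : List Int) (adv : Bool) (l h : Nat) (s : Int × Int) (k : Nat)
    (h1 : s.1 ≤ pvInf) (h2 : s.1 = pvInf → s.2 = -1) :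
    (stepC cost adv l h s k).1 ≤ pvInf ∧
      ((stepC cost adv l h s k).1 = pvInf → (stepC cost adv l h s k).2 = -1) := by
  simp only [stepC, mstep]
  split_ifs
  all_goals try dsimp only
  all_goals first
    | exact ⟨h1, h2⟩
    | (rename_i hc
       exact ⟨le_of_lt (lt_of_lt_of_le hc h1), fun hf => absurd hf (ne_of_lt (lt_of_lt_of_le hc h1))⟩)

lemma fold_stepC_inv (cost : List Int) (adv : Bool) (l h : Nat) :
    ∀ (ks : List Nat) (s : Int × Int), s.1 ≤ pvInf → (s.1 = pvInf → s.2 = -1) →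
    (ks.foldl (stepC cost adv l h) s).1 ≤ pvInf ∧
      ((ks.foldl (stepC cost adv l h) s).1 = pvInf → (ks.foldl (stepC cost adv l h) s).2 = -1) := by
  intro ks
  induction ks with
  | nil => intro s h1 h2; exact ⟨h1, h2⟩
  | cons k ks IH =>
    intro s h1 h2
    simp only [List.foldl_cons]
    exact IH _ (stepC_pres cost adv l h s k h1 h2).1 (stepC_pres cost adv l h s k h1 h2).2

lemma mbV_snd_neg (cost : List Int) (adv : Bool) {l h : Nat} (hlh : l < h)
    (hinf : (mbV cost adv l h).1 = pvInf) : (mbV cost adv l h).2 = -1 := by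
  rw [mbV_eq_fold cost adv hlh] at hinf ⊢
  exact (fold_stepC_inv cost adv l h _ (pvInf, -1) le_rfl (fun _ => rfl)).2 hinf

-- cell predicates
def cellEqT (cost : List Int) (adv : Bool) (mo bt : List (List Int)) (p q : Nat) : Prop :=
  cellT mo p q = (mbV cost adv p q).1 ∧ cellT bt p q = (mbV cost adv p q).2
def freshT (mo bt : List (List Int)) (p q : Nat) : Prop :=
  cellT mo p q = pvInf ∧ cellT bt p q = (-1 : Int)
def triT (cost : List Int) (adv : Bool) (mo bt : List (List Int)) (l h : Nat) : Prop :=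
  ∀ p q, l ≤ p → p ≤ q → q ≤ h → cellEqT cost adv mo bt p q
def armT (cost : List Int) (adv : Bool) (mo bt : List (List Int)) (p q : Nat) : Prop :=
  freshT mo bt p q ∨ (cellEqT cost adv mo bt p q ∧ triT cost adv mo bt p q)
def preTT (cost : List Int) (adv : Bool) (mo bt : List (List Int)) (l h : Nat) : Prop :=
  ∀ p q, l ≤ p → p ≤ q → q ≤ h →
    (p = q → cellEqT cost adv mo bt p q) ∧ (p < q → armT cost adv mo bt p q)
def invTT (cost : List Int) (adv : Bool) (mo bt : List (List Int)) (l h : Nat) : Prop :=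
  ∀ p q, l ≤ p → p ≤ q → q ≤ h → ¬(p = l ∧ q = h) →
    (p = q → cellEqT cost adv mo bt p q) ∧ (p < q → armT cost adv mo bt p q)

-- transfer lemmas: the tables change from (m, b) to (m', b') by settling a triangle
-- [l0, h0] and leaving everything else untouched
lemma cellEqT_transfer {cost : List Int} {adv : Bool} {m b m' b' : List (List Int)} {l0 h0 : Nat}
    (htri : triT cost adv m' b' l0 h0)
    (hun : ∀ p q, ¬(l0 ≤ p ∧ p ≤ q ∧ q ≤ h0) →
      cellT m' p q = cellT m p q ∧ cellT b' p q = cellT b p q)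
    {p q : Nat} (hc : cellEqT cost adv m b p q) : cellEqT cost adv m' b' p q := by
  by_cases hin : l0 ≤ p ∧ p ≤ q ∧ q ≤ h0
  · exact htri p q hin.1 hin.2.1 hin.2.2
  · obtain ⟨e1, e2⟩ := hun p q hin
    exact ⟨e1.trans hc.1, e2.trans hc.2⟩

lemma triT_transfer {cost : List Int} {adv : Bool} {m b m' b' : List (List Int)} {l0 h0 : Nat}
    (htri : triT cost adv m' b' l0 h0)
    (hun : ∀ p q, ¬(l0 ≤ p ∧ p ≤ q ∧ q ≤ h0) →
      cellT m' p q = cellT m p q ∧ cellT b' p q = cellT b p q)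
    {l h : Nat} (ht : triT cost adv m b l h) : triT cost adv m' b' l h :=
  fun p q h1 h2 h3 => cellEqT_transfer htri hun (ht p q h1 h2 h3)

lemma armT_transfer {cost : List Int} {adv : Bool} {m b m' b' : List (List Int)} {l0 h0 : Nat}
    (htri : triT cost adv m' b' l0 h0)
    (hun : ∀ p q, ¬(l0 ≤ p ∧ p ≤ q ∧ q ≤ h0) →
      cellT m' p q = cellT m p q ∧ cellT b' p q = cellT b p q)
    {p q : Nat} (hpq : p ≤ q) (ha : armT cost adv m b p q) : armT cost adv m' b' p q := by
  by_cases hin : l0 ≤ p ∧ q ≤ h0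
  · right
    refine ⟨htri p q hin.1 hpq hin.2, fun a c h1 h2 h3 => htri a c (le_trans hin.1 h1) h2 (le_trans h3 hin.2)⟩
  · have hout : ¬(l0 ≤ p ∧ p ≤ q ∧ q ≤ h0) := fun ⟨x, _, z⟩ => hin ⟨x, z⟩
    obtain ⟨e1, e2⟩ := hun p q hout
    rcases ha with hf | ⟨hc, ht⟩
    · left; exact ⟨e1.trans hf.1, e2.trans hf.2⟩
    · right; exact ⟨cellEqT_transfer htri hun hc, triT_transfer htri hun ht⟩

lemma invTT_transfer {cost : List Int} {adv : Bool} {m b m' b' : List (List Int)} {l0 h0 : Nat}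
    (htri : triT cost adv m' b' l0 h0)
    (hun : ∀ p q, ¬(l0 ≤ p ∧ p ≤ q ∧ q ≤ h0) →
      cellT m' p q = cellT m p q ∧ cellT b' p q = cellT b p q)
    {l h : Nat} (hp : invTT cost adv m b l h) : invTT cost adv m' b' l h := by
  intro p q h1 h2 h3 hne
  exact ⟨fun heq => cellEqT_transfer htri hun ((hp p q h1 h2 h3 hne).1 heq),
         fun hlt => armT_transfer htri hun h2 ((hp p q h1 h2 h3 hne).2 hlt)⟩

-- transfer when only the single cell (w1, w2) changed
lemma cellEqT_of_eq {cost : List Int} {adv : Bool} {m b m' b' : List (List Int)} {p q : Nat}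
    (e1 : cellT m' p q = cellT m p q) (e2 : cellT b' p q = cellT b p q)
    (hc : cellEqT cost adv m b p q) : cellEqT cost adv m' b' p q :=
  ⟨e1.trans hc.1, e2.trans hc.2⟩

lemma triT_of_unchanged {cost : List Int} {adv : Bool} {m b m' b' : List (List Int)} {l h : Nat}
    (hun : ∀ p q, l ≤ p → p ≤ q → q ≤ h →
      cellT m' p q = cellT m p q ∧ cellT b' p q = cellT b p q)
    (ht : triT cost adv m b l h) : triT cost adv m' b' l h := by
  intro p q h1 h2 h3
  obtain ⟨e1, e2⟩ := hun p q h1 h2 h3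
  exact cellEqT_of_eq e1 e2 (ht p q h1 h2 h3)

lemma invTT_of_unchanged_except {cost : List Int} {adv : Bool} {m b m' b' : List (List Int)} {l h : Nat}
    (hun : ∀ p q, ¬(p = l ∧ q = h) → cellT m' p q = cellT m p q ∧ cellT b' p q = cellT b p q)
    (hp : invTT cost adv m b l h) : invTT cost adv m' b' l h := by
  intro p q h1 h2 h3 hne
  have hcell := hun p q hne
  refine ⟨fun heq => cellEqT_of_eq hcell.1 hcell.2 ((hp p q h1 h2 h3 hne).1 heq),
          fun hlt => ?_⟩
  have harm := (hp p q h1 h2 h3 hne).2 hlt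
  rcases harm with hf | ⟨hc, ht⟩
  · left; exact ⟨hcell.1.trans hf.1, hcell.2.trans hf.2⟩
  · right
    refine ⟨cellEqT_of_eq hcell.1 hcell.2 hc, fun a c ha1 ha2 ha3 => ?_⟩
    have hsub : ¬(a = l ∧ c = h) := by
      rintro ⟨rfl, rfl⟩
      exact hne ⟨by omega, by omega⟩
    obtain ⟨e1, e2⟩ := hun a c hsub
    exact cellEqT_of_eq e1 e2 (ht a c ha1 ha2 ha3)

-- post of minimize_util
def postA (cost : List Int) (adv : Bool) (n l h : Nat)
    (mo bt mo' bt' : List (List Int)) (v : Int) : Prop :=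
  v = (mbV cost adv l h).1 ∧ shapeN mo' n ∧ shapeN bt' n ∧
  triT cost adv mo' bt' l h ∧
  (∀ p q, ¬(l ≤ p ∧ p ≤ q ∧ q ≤ h) →
    cellT mo' p q = cellT mo p q ∧ cellT bt' p q = cellT bt p q)

-- unfolding lemmas for the A-side recursion
lemma minA_base (f : Nat) (l : Int) (mo bt : List (List Int)) (adv : Bool) :
    minimize_util f l l mo bt adv = (tget mo l l, (mo, bt)) := by
  rw [minimize_util.eq_def]; simp

lemma minA_memo (f : Nat) (low high : Int) (mo bt : List (List Int)) (adv : Bool)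
    (hne : low ≠ high) (hmemo : tget mo low high ≠ pvInf) :
    minimize_util f low high mo bt adv = (tget mo low high, (mo, bt)) := by
  rw [minimize_util.eq_def]; simp [hne, hmemo]

def loopF (f : Nat) (adv : Bool) (l h a : Nat) (st : List (List Int) × List (List Int)) :
    List (List Int) × List (List Int) :=
  (PySem.List.pyRange (a : Int) (h : Int) 1).foldl
    (fun s k => minimize_util_step f (l : Int) (h : Int) adv s k) st

lemma minA_unfold (f : Nat) (l h : Nat) (mo bt : List (List Int)) (adv : Bool)
    (hne : (l : Int) ≠ (h : Int)) (hinf : tget mo (l : Int) (h : Int) = pvInf) :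
    minimize_util (f + 1) (l : Int) (h : Int) mo bt adv =
      (tget (loopF f adv l h l (mo, bt)).1 (l : Int) (h : Int), loopF f adv l h l (mo, bt)) := by
  rw [minimize_util.eq_def]
  simp [hne, hinf, loopF]

-- partial fold of the defining recurrence, processed splits [l, a)
def partS (cost : List Int) (adv : Bool) (l h a : Nat) : Int × Int :=
  (List.range' l (a - l)).foldl (stepC cost adv l h) (pvInf, -1)

lemma partS_succ (cost : List Int) (adv : Bool) {l h a : Nat} (hla : l ≤ a) :
    partS cost adv l h (a + 1) = stepC cost adv l h (partS cost adv l h a) a := by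
  unfold partS
  have : a + 1 - l = (a - l) + 1 := by omega
  rw [this, List.range'_concat, List.foldl_append, List.foldl_cons, List.foldl_nil]
  congr 1
  omega

lemma mbV_eq_partS (cost : List Int) (adv : Bool) {l h : Nat} (hlh : l < h) :
    mbV cost adv l h = partS cost adv l h h :=
  mbV_eq_fold cost adv hlh

-- the candidate split cost at split point k (what one loop iteration compares)
def scOf (cost : List Int) (adv : Bool) (l h k : Nat) : Int :=
  (if 2 * (mbV cost adv l k).1 + 1 ≠ 1 ∧ (l : Int) = (k : Int) ∧ adv = true
   then PySem.Int.floordiv (2 * (mbV cost adv l k).1 + 1) 4 else 2 * (mbV cost adv l k).1 + 1) +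
  (if 2 * (mbV cost adv (k + 1) h).1 + 1 ≠ 1 ∧ (k : Int) + 1 = (h : Int) ∧ adv = true
   then PySem.Int.floordiv (2 * (mbV cost adv (k + 1) h).1 + 1) 4
   else 2 * (mbV cost adv (k + 1) h).1 + 1) + 1

lemma stepC_scOf (cost : List Int) (adv : Bool) (l h : Nat) (S : Int × Int) (k : Nat) :
    stepC cost adv l h S k =
      if scOf cost adv l h k < S.1 then (scOf cost adv l h k, (k : Int)) else S := rfl

lemma step_eval (cost : List Int) (f : Nat) (adv : Bool) (l h a : Nat)
    (mo bt m1 b1 m2 b2 : List (List Int)) (S : Int × Int)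
    (hv1 : (minimize_util f (l : Int) (a : Int) mo bt adv).1 = (mbV cost adv l a).1)
    (e1 : (minimize_util f (l : Int) (a : Int) mo bt adv).2.1 = m1)
    (e2 : (minimize_util f (l : Int) (a : Int) mo bt adv).2.2 = b1)
    (hv2 : (minimize_util f ((a : Int) + 1) (h : Int) m1 b1 adv).1 = (mbV cost adv (a + 1) h).1)
    (e3 : (minimize_util f ((a : Int) + 1) (h : Int) m1 b1 adv).2.1 = m2)
    (e4 : (minimize_util f ((a : Int) + 1) (h : Int) m1 b1 adv).2.2 = b2)
    (hcell : tget m2 (l : Int) (h : Int) = S.1) :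
    minimize_util_step f (l : Int) (h : Int) adv (mo, bt) (a : Int) =
      (if scOf cost adv l h a < S.1
       then (tset m2 (l : Int) (h : Int) (scOf cost adv l h a), tset b2 (l : Int) (h : Int) (a : Int))
       else (m2, b2)) := by
  rw [minimize_util_step.eq_def]
  dsimp only
  simp only [hv1, e1, e2]
  simp only [hv2, e3, e4]
  rw [hcell]
  rfl

lemma loopA (cost : List Int) (adv : Bool) (n f : Nat)
    (IH : ∀ (l h : Nat) (mo bt : List (List Int)),
      l ≤ h → h < n → h - l ≤ f → shapeN mo n → shapeN bt n → preTT cost adv mo bt l h →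
      postA cost adv n l h mo bt
        (minimize_util f (l : Int) (h : Int) mo bt adv).2.1
        (minimize_util f (l : Int) (h : Int) mo bt adv).2.2
        (minimize_util f (l : Int) (h : Int) mo bt adv).1) :
    ∀ (d a l h : Nat) (mo bt : List (List Int)),
    l ≤ a → a ≤ h → h - a = d → l < h → h < n → h - l ≤ f + 1 →
    shapeN mo n → shapeN bt n →
    invTT cost adv mo bt l h →
    (l < a → triT cost adv mo bt l (a - 1) ∧ triT cost adv mo bt (l + 1) h) →
    cellT mo l h = (partS cost adv l h a).1 →
    cellT bt l h = (partS cost adv l h a).2 →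
    (shapeN (loopF f adv l h a (mo, bt)).1 n ∧ shapeN (loopF f adv l h a (mo, bt)).2 n ∧
     cellT (loopF f adv l h a (mo, bt)).1 l h = (partS cost adv l h h).1 ∧
     cellT (loopF f adv l h a (mo, bt)).2 l h = (partS cost adv l h h).2 ∧
     triT cost adv (loopF f adv l h a (mo, bt)).1 (loopF f adv l h a (mo, bt)).2 l (h - 1) ∧
     triT cost adv (loopF f adv l h a (mo, bt)).1 (loopF f adv l h a (mo, bt)).2 (l + 1) h ∧
     (∀ p q, ¬(l ≤ p ∧ p ≤ q ∧ q ≤ h) →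
       cellT (loopF f adv l h a (mo, bt)).1 p q = cellT mo p q ∧
       cellT (loopF f adv l h a (mo, bt)).2 p q = cellT bt p q)) := by
  intro d
  induction d with
  | zero =>
    intro a l h mo bt hla hah hd hlh hhn hfuel hs1 hs2 hinv hsettle hc1 hc2
    have hae : a = h := by omega
    subst hae
    have hemp : PySem.List.pyRange (a : Int) (a : Int) 1 = [] := by
      rw [PySem.List.pyRange_one]; simp
    rw [loopF, hemp, List.foldl_nil]
    obtain ⟨ht1, ht2⟩ := hsettle hlh
    exact ⟨hs1, hs2, hc1, hc2, ht1, ht2, fun p q _ => ⟨rfl, rfl⟩⟩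
  | succ d IHd =>
    intro a l h mo bt hla hah hd hlh hhn hfuel hs1 hs2 hinv hsettle hc1 hc2
    have hah' : a < h := by omega
    -- peel one iteration
    rw [loopF, PySem.List.pyRange_one_cons (by exact_mod_cast hah'), List.foldl_cons]
    -- the left recursive call
    have hpre1 : preTT cost adv mo bt l a := by
      intro p q hp hpq hq
      exact hinv p q hp hpq (by omega) (by rintro ⟨-, rfl⟩; omega)
    obtain ⟨hv1, hs1', hs2', htri1, hun1⟩ :=
      IH l a mo bt hla (by omega) (by omega) hs1 hs2 hpre1
    have hinv1 : invTT cost adv (minimize_util f (l : Int) (a : Int) mo bt adv).2.1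
        (minimize_util f (l : Int) (a : Int) mo bt adv).2.2 l h :=
      invTT_transfer htri1 hun1 hinv
    -- the right recursive call
    have hpre2 : preTT cost adv (minimize_util f (l : Int) (a : Int) mo bt adv).2.1
        (minimize_util f (l : Int) (a : Int) mo bt adv).2.2 (a + 1) h := by
      intro p q hp hpq hq
      exact hinv1 p q (by omega) hpq hq (by rintro ⟨rfl, -⟩; omega)
    obtain ⟨hv2, hs1'', hs2'', htri2, hun2⟩ :=
      IH (a + 1) h _ _ (by omega) hhn (by omega) hs1' hs2' hpre2
    have hcast : ((a + 1 : Nat) : Int) = (a : Int) + 1 := by push_cast; ring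
    rw [hcast] at hv2 hs1'' hs2'' htri2 hun2
    set m1 := (minimize_util f (l : Int) (a : Int) mo bt adv).2.1 with hm1
    set b1 := (minimize_util f (l : Int) (a : Int) mo bt adv).2.2 with hb1
    set m2 := (minimize_util f ((a : Int) + 1) (h : Int) m1 b1 adv).2.1 with hm2
    set b2 := (minimize_util f ((a : Int) + 1) (h : Int) m1 b1 adv).2.2 with hb2
    have hinv2 : invTT cost adv m2 b2 l h := invTT_transfer htri2 hun2 hinv1
    -- the (l,h) cell is outside both settled triangles
    have hout1 : ¬(l ≤ l ∧ l ≤ h ∧ h ≤ a) := by omega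
    have hout2 : ¬(a + 1 ≤ l ∧ l ≤ h ∧ h ≤ h) := by omega
    have hcell2m : cellT m2 l h = (partS cost adv l h a).1 := by
      rw [(hun2 l h hout2).1, (hun1 l h hout1).1, hc1]
    have hcell2b : cellT b2 l h = (partS cost adv l h a).2 := by
      rw [(hun2 l h hout2).2, (hun1 l h hout1).2, hc2]
    have htriLa2 : triT cost adv m2 b2 l a := triT_transfer htri2 hun2 htri1
    have htriL1h2 : triT cost adv m2 b2 (l + 1) h := by
      rcases Nat.lt_or_ge l a with hcase | hcase
      · exact triT_transfer htri2 hun2 (triT_transfer htri1 hun1 (hsettle hcase).2)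
      · have haeq : a = l := by omega
        subst haeq
        exact htri2
    -- evaluate the loop body
    have hB := step_eval cost f adv l h a mo bt m1 b1 m2 b2 (partS cost adv l h a)
      hv1 rfl rfl hv2 rfl rfl (by rw [tget_nat]; exact hcell2m)
    rw [hB]
    have hSsucc : partS cost adv l h (a + 1) = stepC cost adv l h (partS cost adv l h a) a :=
      partS_succ cost adv hla
    have hlen : l < n := by omega
    by_cases hcnd : scOf cost adv l h a < (partS cost adv l h a).1
    · rw [if_pos hcnd, tset_nat, tset_nat]
      have hunw : ∀ p q : Nat, ¬(p = l ∧ q = h) →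
          cellT (m2.set l ((m2.getD l []).set h (scOf cost adv l h a))) p q = cellT m2 p q ∧
          cellT (b2.set l ((b2.getD l []).set h ((a : Int)))) p q = cellT b2 p q :=
        fun p q hne => ⟨cellT_set_ne _ hne, cellT_set_ne _ hne⟩
      have concl := IHd (a + 1) l h
        (m2.set l ((m2.getD l []).set h (scOf cost adv l h a)))
        (b2.set l ((b2.getD l []).set h ((a : Int))))
        (by omega) (by omega) (by omega) hlh hhn hfuel
        (shapeN_set hs1'' _) (shapeN_set hs2'' _)
        (invTT_of_unchanged_except hunw hinv2)
        (fun _ => ⟨by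
            have : a + 1 - 1 = a := by omega
            rw [this]
            exact triT_of_unchanged (fun p q h1 h2 h3 => hunw p q (by omega)) htriLa2,
          triT_of_unchanged (fun p q h1 h2 h3 => hunw p q (by omega)) htriL1h2⟩)
        (by rw [cellT_set_self hs1'' hlen hhn, hSsucc, stepC_scOf, if_pos hcnd])
        (by rw [cellT_set_self hs2'' hlen hhn, hSsucc, stepC_scOf, if_pos hcnd])
      rw [loopF, hcast] at concl
      refine ⟨concl.1, concl.2.1, concl.2.2.1, concl.2.2.2.1, concl.2.2.2.2.1,
        concl.2.2.2.2.2.1, fun p q hpq => ?_⟩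
      have hq2 : ¬(a + 1 ≤ p ∧ p ≤ q ∧ q ≤ h) := by
        rintro ⟨x, y, z⟩; exact hpq ⟨by omega, y, z⟩
      have hq1 : ¬(l ≤ p ∧ p ≤ q ∧ q ≤ a) := by
        rintro ⟨x, y, z⟩; exact hpq ⟨x, y, by omega⟩
      have hqw : ¬(p = l ∧ q = h) := by
        rintro ⟨rfl, rfl⟩; exact hpq ⟨le_rfl, by omega, le_rfl⟩
      exact ⟨((concl.2.2.2.2.2.2 p q hpq).1.trans ((hunw p q hqw).1)).trans
               (((hun2 p q hq2).1).trans ((hun1 p q hq1).1)),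
             ((concl.2.2.2.2.2.2 p q hpq).2.trans ((hunw p q hqw).2)).trans
               (((hun2 p q hq2).2).trans ((hun1 p q hq1).2))⟩
    · rw [if_neg hcnd]
      have concl := IHd (a + 1) l h m2 b2
        (by omega) (by omega) (by omega) hlh hhn hfuel hs1'' hs2'' hinv2
        (fun _ => ⟨by
            have : a + 1 - 1 = a := by omega
            rw [this]; exact htriLa2, htriL1h2⟩)
        (by rw [hcell2m, hSsucc, stepC_scOf, if_neg hcnd])
        (by rw [hcell2b, hSsucc, stepC_scOf, if_neg hcnd])
      rw [loopF, hcast] at concl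
      refine ⟨concl.1, concl.2.1, concl.2.2.1, concl.2.2.2.1, concl.2.2.2.2.1,
        concl.2.2.2.2.2.1, fun p q hpq => ?_⟩
      have hq2 : ¬(a + 1 ≤ p ∧ p ≤ q ∧ q ≤ h) := by
        rintro ⟨x, y, z⟩; exact hpq ⟨by omega, y, z⟩
      have hq1 : ¬(l ≤ p ∧ p ≤ q ∧ q ≤ a) := by
        rintro ⟨x, y, z⟩; exact hpq ⟨x, y, by omega⟩
      exact ⟨(concl.2.2.2.2.2.2 p q hpq).1.trans (((hun2 p q hq2).1).trans ((hun1 p q hq1).1)),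
             (concl.2.2.2.2.2.2 p q hpq).2.trans (((hun2 p q hq2).2).trans ((hun1 p q hq1).2))⟩

-- the diagonal / memo-hit exits of minimize_util
lemma minA_diag (cost : List Int) (adv : Bool) (n : Nat) (f l : Nat) (mo bt : List (List Int))
    (hs1 : shapeN mo n) (hs2 : shapeN bt n) (hpre : preTT cost adv mo bt l l) :
    postA cost adv n l l mo bt
      (minimize_util f (l : Int) (l : Int) mo bt adv).2.1
      (minimize_util f (l : Int) (l : Int) mo bt adv).2.2
      (minimize_util f (l : Int) (l : Int) mo bt adv).1 := by
  rw [minA_base]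
  have hd := (hpre l l le_rfl le_rfl le_rfl).1 rfl
  refine ⟨by rw [tget_nat]; exact hd.1, hs1, hs2, fun p q hp hq hqh => ?_, fun p q _ => ⟨rfl, rfl⟩⟩
  have hpq : p = l := by omega
  have hqq : q = l := by omega
  subst hpq; subst hqq
  exact hd

lemma minA_main (cost : List Int) (adv : Bool) (n : Nat) :
    ∀ (f : Nat) (l h : Nat) (mo bt : List (List Int)),
    l ≤ h → h < n → h - l ≤ f → shapeN mo n → shapeN bt n → preTT cost adv mo bt l h →
    postA cost adv n l h mo bt
      (minimize_util f (l : Int) (h : Int) mo bt adv).2.1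
      (minimize_util f (l : Int) (h : Int) mo bt adv).2.2
      (minimize_util f (l : Int) (h : Int) mo bt adv).1 := by
  intro f
  induction f with
  | zero =>
    intro l h mo bt h1 h2 h3 hs1 hs2 hpre
    have : l = h := by omega
    subst this
    exact minA_diag cost adv n 0 l mo bt hs1 hs2 hpre
  | succ f IHf =>
    intro l h mo bt h1 h2 h3 hs1 hs2 hpre
    rcases eq_or_lt_of_le h1 with heq | hlh
    · subst heq
      exact minA_diag cost adv n (f + 1) l mo bt hs1 hs2 hpre
    · have hne : (l : Int) ≠ (h : Int) := by
        intro hcon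
        have : l = h := by exact_mod_cast hcon
        omega
      have harm := (hpre l h le_rfl (le_of_lt hlh) le_rfl).2 hlh
      by_cases hmemo : cellT mo l h = pvInf
      · -- compute branch
        have hbt : cellT bt l h = -1 := by
          rcases harm with hf | ⟨hc, -⟩
          · exact hf.2
          · exact hc.2.trans (mbV_snd_neg cost adv hlh (hc.1.symm.trans hmemo))
        rw [minA_unfold f l h mo bt adv hne (by rw [tget_nat]; exact hmemo)]
        have hS0 : partS cost adv l h l = (pvInf, -1) := by
          unfold partS
          rw [Nat.sub_self]
          rfl
        have loop := loopA cost adv n f IHf (h - l) l l h mo bt le_rfl (le_of_lt hlh) rfl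
          hlh h2 h3 hs1 hs2
          (fun p q a b c _ => hpre p q a b c)
          (fun hcon => absurd hcon (lt_irrefl l))
          (by rw [hS0]; exact hmemo)
          (by rw [hS0]; exact hbt)
        obtain ⟨ls1, ls2, lc1, lc2, lt1, lt2, lun⟩ := loop
        have hval : (mbV cost adv l h).1 = (partS cost adv l h h).1 := by
          rw [mbV_eq_partS cost adv hlh]
        have hval2 : (mbV cost adv l h).2 = (partS cost adv l h h).2 := by
          rw [mbV_eq_partS cost adv hlh]
        refine ⟨by rw [tget_nat]; rw [lc1, hval], ls1, ls2, fun p q hp hq hqh => ?_, lun⟩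
        rcases Nat.lt_or_ge q h with hql | hqh'
        · exact lt1 p q hp hq (by omega)
        · have hqe : q = h := by omega
          subst hqe
          rcases Nat.lt_or_ge l p with hlp | hpl
          · exact lt2 p q (by omega) hq le_rfl
          · have hpe : p = l := by omega
            subst hpe
            exact ⟨by rw [lc1, hval], by rw [lc2, hval2]⟩
      · -- memo hit
        rw [minA_memo (f + 1) l h mo bt adv hne (by rw [tget_nat]; exact hmemo)]
        rcases harm with hf | ⟨hc, htr⟩
        · exact absurd hf.1 hmemo
        · exact ⟨by rw [tget_nat]; exact hc.1, hs1, hs2, htr, fun p q _ => ⟨rfl, rfl⟩⟩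

-- shared diagonal-initialisation prefix
def initSt (cost : List Int) : List (List Int) × List (List Int) :=
  (List.range cost.length).foldl
    (fun (s : List (List Int) × List (List Int)) (i : Nat) =>
      (tset s.1 (i : Int) (i : Int) (PySem.List.pyGetD cost (i : Int) 0),
       tset s.2 (i : Int) (i : Int) (i : Int)))
    ((List.range cost.length).map (fun _ => List.replicate cost.length pvInf),
     (List.range cost.length).map (fun _ => List.replicate cost.length (-1 : Int)))

lemma initSt_aux (cost : List Int) : ∀ m, m ≤ cost.length →
    (shapeN ((List.range m).foldl
      (fun (s : List (List Int) × List (List Int)) (i : Nat) =>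
        (tset s.1 (i : Int) (i : Int) (PySem.List.pyGetD cost (i : Int) 0),
         tset s.2 (i : Int) (i : Int) (i : Int)))
      ((List.range cost.length).map (fun _ => List.replicate cost.length pvInf),
       (List.range cost.length).map (fun _ => List.replicate cost.length (-1 : Int)))).1 cost.length ∧
     shapeN ((List.range m).foldl
      (fun (s : List (List Int) × List (List Int)) (i : Nat) =>
        (tset s.1 (i : Int) (i : Int) (PySem.List.pyGetD cost (i : Int) 0),
         tset s.2 (i : Int) (i : Int) (i : Int)))
      ((List.range cost.length).map (fun _ => List.replicate cost.length pvInf),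
       (List.range cost.length).map (fun _ => List.replicate cost.length (-1 : Int)))).2 cost.length) ∧
    (∀ i, i < m →
      cellT ((List.range m).foldl
        (fun (s : List (List Int) × List (List Int)) (i : Nat) =>
          (tset s.1 (i : Int) (i : Int) (PySem.List.pyGetD cost (i : Int) 0),
           tset s.2 (i : Int) (i : Int) (i : Int)))
        ((List.range cost.length).map (fun _ => List.replicate cost.length pvInf),
         (List.range cost.length).map (fun _ => List.replicate cost.length (-1 : Int)))).1 i i = cost.getD i 0 ∧
      cellT ((List.range m).foldl
        (fun (s : List (List Int) × List (List Int)) (i : Nat) =>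
          (tset s.1 (i : Int) (i : Int) (PySem.List.pyGetD cost (i : Int) 0),
           tset s.2 (i : Int) (i : Int) (i : Int)))
        ((List.range cost.length).map (fun _ => List.replicate cost.length pvInf),
         (List.range cost.length).map (fun _ => List.replicate cost.length (-1 : Int)))).2 i i = (i : Int)) ∧
    (∀ p q, ¬(p = q ∧ p < m) →
      cellT ((List.range m).foldl
        (fun (s : List (List Int) × List (List Int)) (i : Nat) =>
          (tset s.1 (i : Int) (i : Int) (PySem.List.pyGetD cost (i : Int) 0),
           tset s.2 (i : Int) (i : Int) (i : Int)))
        ((List.range cost.length).map (fun _ => List.replicate cost.length pvInf),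
         (List.range cost.length).map (fun _ => List.replicate cost.length (-1 : Int)))).1 p q
        = cellT ((List.range cost.length).map (fun _ => List.replicate cost.length pvInf)) p q ∧
      cellT ((List.range m).foldl
        (fun (s : List (List Int) × List (List Int)) (i : Nat) =>
          (tset s.1 (i : Int) (i : Int) (PySem.List.pyGetD cost (i : Int) 0),
           tset s.2 (i : Int) (i : Int) (i : Int)))
        ((List.range cost.length).map (fun _ => List.replicate cost.length pvInf),
         (List.range cost.length).map (fun _ => List.replicate cost.length (-1 : Int)))).2 p q
        = cellT ((List.range cost.length).map (fun _ => List.replicate cost.length (-1 : Int))) p q) := by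
  intro m
  induction m with
  | zero =>
    intro _
    refine ⟨⟨shapeN_const _ _, shapeN_const _ _⟩, fun i hi => by omega, fun p q _ => ⟨rfl, rfl⟩⟩
  | succ m IH =>
    intro hm
    obtain ⟨⟨hs1, hs2⟩, hdiag, hoff⟩ := IH (by omega)
    rw [List.range_succ, List.foldl_append, List.foldl_cons, List.foldl_nil]
    constructor
    · constructor
      · rw [tset_nat]; exact shapeN_set hs1 _
      · rw [tset_nat]; exact shapeN_set hs2 _
    constructor
    · intro i hi
      by_cases him : i = m
      · subst him
        rw [tset_nat, tset_nat]
        constructor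
        · rw [cellT_set_self hs1 (by omega) (by omega)]
          simp [PySem.List.pyGetD_natCast]
        · rw [cellT_set_self hs2 (by omega) (by omega)]
      · have hi' : i < m := by omega
        rw [tset_nat, tset_nat]
        rw [cellT_set_ne _ (by omega), cellT_set_ne _ (by omega)]
        exact hdiag i hi'
    · intro p q hpq
      rw [tset_nat, tset_nat]
      have hne : ¬(p = m ∧ q = m) := by
        rintro ⟨rfl, rfl⟩; exact hpq ⟨rfl, by omega⟩
      rw [cellT_set_ne _ hne, cellT_set_ne _ hne]
      exact hoff p q (by rintro ⟨rfl, h⟩; exact hpq ⟨rfl, by omega⟩)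

lemma initSt_main (cost : List Int) :
    shapeN (initSt cost).1 cost.length ∧ shapeN (initSt cost).2 cost.length ∧
    (∀ i, i < cost.length →
      cellT (initSt cost).1 i i = cost.getD i 0 ∧ cellT (initSt cost).2 i i = (i : Int)) ∧
    (∀ p q, p < cost.length → q < cost.length → p ≠ q →
      cellT (initSt cost).1 p q = pvInf ∧ cellT (initSt cost).2 p q = (-1 : Int)) := by
  obtain ⟨⟨hs1, hs2⟩, hdiag, hoff⟩ := initSt_aux cost cost.length le_rfl
  refine ⟨hs1, hs2, hdiag, fun p q hp hq hpq => ?_⟩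
  obtain ⟨e1, e2⟩ := hoff p q (by rintro ⟨rfl, _⟩; exact hpq rfl)
  rw [initSt]
  exact ⟨e1.trans (cellT_const _ hp hq), e2.trans (cellT_const _ hp hq)⟩

lemma initSt_preTT (cost : List Int) (adv : Bool) (hc : cost ≠ []) :
    preTT cost adv (initSt cost).1 (initSt cost).2 0 (cost.length - 1) := by
  obtain ⟨hs1, hs2, hdiag, hoff⟩ := initSt_main cost
  have hlen : 1 ≤ cost.length := List.length_pos_iff.2 hc
  intro p q h1 h2 h3
  constructor
  · rintro rfl
    have hp : p < cost.length := by omega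
    obtain ⟨e1, e2⟩ := hdiag p hp
    exact ⟨by rw [e1, mbV_diag], by rw [e2, mbV_diag]⟩
  · intro hlt
    left
    exact hoff p q (by omega) (by omega) (by omega)

-- B-side final characterisation
def doneInv (cost : List Int) (adv : Bool) (n : Nat) (m b : List (List Int)) : Prop :=
  shapeN m n ∧ shapeN b n ∧
  (∀ p q, p < n → q < n → p ≤ q → cellEqT cost adv m b p q) ∧
  (∀ p q, p < n → q < n → q < p → cellT m p q = pvInf ∧ cellT b p q = (-1 : Int))

-- the three nested loop bodies of B, as named functions (definitionally equal to the port's lambdas)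
def innerBodyB (adv : Bool) (m : List (List Int)) (i j : Int) : (Int × Int) → Int → (Int × Int) :=
  fun ba k =>
    let left0 := 2 * tget m i k + 1
    let left_cost := if left0 ≠ 1 ∧ i = k ∧ adv = true
                     then PySem.Int.floordiv left0 4 else left0
    let right0 := 2 * tget m (k + 1) j + 1
    let right_cost := if right0 ≠ 1 ∧ k + 1 = j ∧ adv = true
                      then PySem.Int.floordiv right0 4 else right0
    let split_cost := left_cost + right_cost + 1
    if split_cost < ba.1 then (split_cost, k) else ba

def midBodyB (adv : Bool) (len : Int) :
    (List (List Int) × List (List Int)) → Int → (List (List Int) × List (List Int)) :=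
  fun s i =>
    let j := i + len - 1
    let ba := (PySem.List.pyRange i j 1).foldl (innerBodyB adv s.1 i j) (pvInf, -1)
    (tset s.1 i j ba.1, tset s.2 i j ba.2)

def outerBodyB (adv : Bool) (num_var : Nat) :
    (List (List Int) × List (List Int)) → Int → (List (List Int) × List (List Int)) :=
  fun s len => (PySem.List.pyRange 0 ((num_var : Int) - len + 1) 1).foldl (midBodyB adv len) s

lemma alt_eq (cost : List Int) (is_nand is_dnf : Bool) :
    second_layer_alt cost is_nand is_dnf =
      (((PySem.List.pyRange 2 ((cost.length : Int) + 1) 1).foldl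
          (outerBodyB (is_nand == is_dnf) cost.length) (initSt cost)).2,
       ((PySem.List.pyRange 2 ((cost.length : Int) + 1) 1).foldl
          (outerBodyB (is_nand == is_dnf) cost.length) (initSt cost)).1) := rfl

lemma tget_nat_succ (m : List (List Int)) (a j : Nat) :
    tget m ((a : Int) + 1) (j : Int) = cellT m (a + 1) j := by
  rw [show ((a : Int) + 1) = ((a + 1 : Nat) : Int) by push_cast; ring, tget_nat]

lemma innerB (cost : List Int) (adv : Bool) (m : List (List Int)) (i j : Nat) (hij : i < j)
    (hread : ∀ p q : Nat, i ≤ p → p ≤ q → q ≤ j → q - p < j - i →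
      cellT m p q = (mbV cost adv p q).1) :
    ∀ (d a : Nat) (s : Int × Int), i ≤ a → a ≤ j → j - a = d →
    (PySem.List.pyRange (a : Int) (j : Int) 1).foldl (innerBodyB adv m (i : Int) (j : Int)) s
      = (List.range' a (j - a)).foldl (stepC cost adv i j) s := by
  intro d
  induction d with
  | zero =>
    intro a s hia haj hd
    have : a = j := by omega
    subst this
    rw [PySem.List.pyRange_one]
    simp
  | succ d IHd =>
    intro a s hia haj hd
    have haj' : a < j := by omega
    rw [PySem.List.pyRange_one_cons (by exact_mod_cast haj'), List.foldl_cons,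
        show j - a = (j - (a + 1)) + 1 by omega, List.range'_succ, List.foldl_cons]
    have hbody : innerBodyB adv m (i : Int) (j : Int) s (a : Int) = stepC cost adv i j s a := by
      rw [innerBodyB]
      rw [tget_nat m i a, tget_nat_succ m a j,
          hread i a le_rfl hia haj'.le (by omega),
          hread (a + 1) j (by omega) (by omega) le_rfl (by omega)]
      rfl
    rw [hbody, show ((a : Int) + 1) = ((a + 1 : Nat) : Int) by push_cast; ring]
    exact IHd (a + 1) _ (by omega) (by omega) (by omega)

def MinvB (cost : List Int) (adv : Bool) (n L i0 : Nat) (m b : List (List Int)) : Prop :=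
  shapeN m n ∧ shapeN b n ∧
  (∀ p q, p < n → q < n → p ≤ q →
    (q - p + 1 < L → cellEqT cost adv m b p q) ∧
    (q - p + 1 = L → ((p < i0 → cellEqT cost adv m b p q) ∧ (i0 ≤ p → freshT m b p q))) ∧
    (L < q - p + 1 → freshT m b p q)) ∧
  (∀ p q, p < n → q < n → q < p → cellT m p q = pvInf ∧ cellT b p q = (-1 : Int))

lemma midB (cost : List Int) (adv : Bool) (n L : Nat) (h2L : 2 ≤ L) (hLn : L ≤ n) :
    ∀ (d i0 : Nat) (m b : List (List Int)), i0 + d = n - L + 1 →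
    MinvB cost adv n L i0 m b →
    MinvB cost adv n L (n - L + 1)
      ((PySem.List.pyRange (i0 : Int) ((n : Int) - (L : Int) + 1) 1).foldl
        (midBodyB adv (L : Int)) (m, b)).1
      ((PySem.List.pyRange (i0 : Int) ((n : Int) - (L : Int) + 1) 1).foldl
        (midBodyB adv (L : Int)) (m, b)).2 := by
  have hub : ((n : Int) - (L : Int) + 1) = ((n - L + 1 : Nat) : Int) := by push_cast [hLn]; ring
  intro d
  induction d with
  | zero =>
    intro i0 m b hd hinv
    have : i0 = n - L + 1 := by omega
    subst this
    rw [hub, PySem.List.pyRange_one]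
    simpa using hinv
  | succ d IHd =>
    intro i0 m b hd hinv
    have hi0 : i0 < n - L + 1 := by omega
    rw [PySem.List.pyRange_one_cons (by rw [hub]; exact_mod_cast hi0), List.foldl_cons]
    obtain ⟨hs1, hs2, hmain, hlow⟩ := hinv
    -- evaluate the middle body at i = i0
    set jN := i0 + L - 1 with hjN
    have hjn : jN < n := by omega
    have hijN : i0 < jN := by omega
    have hjcast : (i0 : Int) + (L : Int) - 1 = ((jN : Nat) : Int) := by
      rw [hjN]; push_cast [show 1 ≤ L by omega]; ring_nf; omega
    have hbody : midBodyB adv (L : Int) (m, b) (i0 : Int) =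
        (m.set i0 ((m.getD i0 []).set jN (mbV cost adv i0 jN).1),
         b.set i0 ((b.getD i0 []).set jN (mbV cost adv i0 jN).2)) := by
      rw [midBodyB]
      dsimp only
      rw [hjcast]
      rw [innerB cost adv m i0 jN hijN
            (fun p q hp hpq hq hspan => ((hmain p q (by omega) (by omega) hpq).1 (by omega)).1)
            (jN - i0) i0 (pvInf, -1) le_rfl (by omega) rfl]
      rw [show (List.range' i0 (jN - i0)).foldl (stepC cost adv i0 jN) (pvInf, -1)
            = mbV cost adv i0 jN from (mbV_eq_partS cost adv hijN).symm]
      rw [tset_nat, tset_nat]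
    rw [hbody]
    have hset1 := shapeN_set (n := n) (p := i0) (q := jN) hs1 (mbV cost adv i0 jN).1
    have hset2 := shapeN_set (n := n) (p := i0) (q := jN) hs2 (mbV cost adv i0 jN).2
    have hcells : ∀ p q : Nat, ¬(p = i0 ∧ q = jN) →
        cellT (m.set i0 ((m.getD i0 []).set jN (mbV cost adv i0 jN).1)) p q = cellT m p q ∧
        cellT (b.set i0 ((b.getD i0 []).set jN (mbV cost adv i0 jN).2)) p q = cellT b p q :=
      fun p q hne => ⟨cellT_set_ne _ hne, cellT_set_ne _ hne⟩
    have hnew : MinvB cost adv n L (i0 + 1)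
        (m.set i0 ((m.getD i0 []).set jN (mbV cost adv i0 jN).1))
        (b.set i0 ((b.getD i0 []).set jN (mbV cost adv i0 jN).2)) := by
      refine ⟨hset1, hset2, fun p q hp hq hpq => ⟨?_, ?_, ?_⟩, fun p q hp hq hqp => ?_⟩
      · intro hspan
        have hne : ¬(p = i0 ∧ q = jN) := by rintro ⟨rfl, rfl⟩; omega
        exact cellEqT_of_eq (hcells p q hne).1 (hcells p q hne).2
          ((hmain p q hp hq hpq).1 hspan)
      · intro hspan
        constructor
        · intro hpi
          by_cases hne : p = i0 ∧ q = jN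
          · obtain ⟨rfl, rfl⟩ := hne
            exact ⟨by rw [cellT_set_self hs1 hp hq], by rw [cellT_set_self hs2 hp hq]⟩
          · exact cellEqT_of_eq (hcells p q hne).1 (hcells p q hne).2
              (((hmain p q hp hq hpq).2.1 hspan).1 (by
                rcases Nat.lt_or_ge p i0 with hc | hc
                · exact hc
                · exfalso; exact hne ⟨by omega, by omega⟩))
        · intro hpi
          have hne : ¬(p = i0 ∧ q = jN) := by rintro ⟨rfl, rfl⟩; omega
          obtain ⟨e1, e2⟩ := hcells p q hne
          have := ((hmain p q hp hq hpq).2.1 hspan).2 (by omega)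
          exact ⟨e1.trans this.1, e2.trans this.2⟩
      · intro hspan
        have hne : ¬(p = i0 ∧ q = jN) := by rintro ⟨rfl, rfl⟩; omega
        obtain ⟨e1, e2⟩ := hcells p q hne
        have := (hmain p q hp hq hpq).2.2 hspan
        exact ⟨e1.trans this.1, e2.trans this.2⟩
      · have hne : ¬(p = i0 ∧ q = jN) := by rintro ⟨rfl, rfl⟩; omega
        obtain ⟨e1, e2⟩ := hcells p q hne
        have := hlow p q hp hq hqp
        exact ⟨e1.trans this.1, e2.trans this.2⟩
    rw [show ((i0 : Int) + 1) = ((i0 + 1 : Nat) : Int) by push_cast; ring]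
    exact IHd (i0 + 1) _ _ (by omega) hnew

def OinvB (cost : List Int) (adv : Bool) (n L : Nat) (m b : List (List Int)) : Prop :=
  shapeN m n ∧ shapeN b n ∧
  (∀ p q, p < n → q < n → p ≤ q →
    (q - p + 1 ≤ L → cellEqT cost adv m b p q) ∧ (L < q - p + 1 → freshT m b p q)) ∧
  (∀ p q, p < n → q < n → q < p → cellT m p q = pvInf ∧ cellT b p q = (-1 : Int))

lemma outerB (cost : List Int) (adv : Bool) (n : Nat) :
    ∀ (d A : Nat) (m b : List (List Int)), 2 ≤ A → (n + 1) - A = d →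
    OinvB cost adv n (A - 1) m b →
    doneInv cost adv n
      ((PySem.List.pyRange (A : Int) ((n : Int) + 1) 1).foldl (outerBodyB adv n) (m, b)).1
      ((PySem.List.pyRange (A : Int) ((n : Int) + 1) 1).foldl (outerBodyB adv n) (m, b)).2 := by
  intro d
  induction d with
  | zero =>
    intro A m b h2A hd hinv
    have hemp : PySem.List.pyRange (A : Int) ((n : Int) + 1) 1 = [] := by
      rw [PySem.List.pyRange_one]
      have : ((n : Int) + 1 - (A : Int)).toNat = 0 := by omega
      rw [this]; simp
    rw [hemp, List.foldl_nil]
    obtain ⟨hs1, hs2, hmain, hlow⟩ := hinv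
    exact ⟨hs1, hs2, fun p q hp hq hpq => (hmain p q hp hq hpq).1 (by omega), hlow⟩
  | succ d IHd =>
    intro A m b h2A hd hinv
    have hAn : A ≤ n := by omega
    rw [PySem.List.pyRange_one_cons (by exact_mod_cast (by omega : (A : Nat) < n + 1)), List.foldl_cons]
    obtain ⟨hs1, hs2, hmain, hlow⟩ := hinv
    have hmid0 : MinvB cost adv n A 0 m b := by
      refine ⟨hs1, hs2, fun p q hp hq hpq => ⟨?_, ?_, ?_⟩, hlow⟩
      · intro hspan; exact (hmain p q hp hq hpq).1 (by omega)
      · intro hspan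
        exact ⟨fun hcon => absurd hcon (by omega), fun _ => (hmain p q hp hq hpq).2 (by omega)⟩
      · intro hspan; exact (hmain p q hp hq hpq).2 (by omega)
    have hmid := midB cost adv n A h2A hAn (n - A + 1) 0 m b (by omega) hmid0
    have hOA : OinvB cost adv n A
        ((PySem.List.pyRange ((0 : Nat) : Int) ((n : Int) - (A : Int) + 1) 1).foldl
          (midBodyB adv (A : Int)) (m, b)).1
        ((PySem.List.pyRange ((0 : Nat) : Int) ((n : Int) - (A : Int) + 1) 1).foldl
          (midBodyB adv (A : Int)) (m, b)).2 := by
      obtain ⟨ms1, ms2, mmain, mlow⟩ := hmid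
      refine ⟨ms1, ms2, fun p q hp hq hpq => ⟨fun hspan => ?_, fun hspan => ?_⟩, mlow⟩
      · rcases Nat.lt_or_ge (q - p + 1) A with hc | hc
        · exact (mmain p q hp hq hpq).1 hc
        · exact ((mmain p q hp hq hpq).2.1 (by omega)).1 (by omega)
      · exact (mmain p q hp hq hpq).2.2 hspan
    have hbody : outerBodyB adv n (m, b) (A : Int) =
        ((PySem.List.pyRange ((0 : Nat) : Int) ((n : Int) - (A : Int) + 1) 1).foldl
          (midBodyB adv (A : Int)) (m, b)) := by
      rw [outerBodyB]
      norm_num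
    rw [hbody]
    rw [show ((A : Int) + 1) = ((A + 1 : Nat) : Int) by push_cast; ring]
    have := IHd (A + 1)
      ((PySem.List.pyRange ((0 : Nat) : Int) ((n : Int) - (A : Int) + 1) 1).foldl
        (midBodyB adv (A : Int)) (m, b)).1
      ((PySem.List.pyRange ((0 : Nat) : Int) ((n : Int) - (A : Int) + 1) 1).foldl
        (midBodyB adv (A : Int)) (m, b)).2
      (by omega) (by omega) (by rw [show A + 1 - 1 = A by omega]; exact hOA)
    simpa using this

lemma altB_main (cost : List Int) (is_nand is_dnf : Bool) :
    doneInv cost (is_nand == is_dnf) cost.length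
      (second_layer_alt cost is_nand is_dnf).2 (second_layer_alt cost is_nand is_dnf).1 := by
  rw [alt_eq]
  obtain ⟨hs1, hs2, hdiag, hoff⟩ := initSt_main cost
  have hO1 : OinvB cost (is_nand == is_dnf) cost.length 1 (initSt cost).1 (initSt cost).2 := by
    refine ⟨hs1, hs2, fun p q hp hq hpq => ⟨fun hspan => ?_, fun hspan => ?_⟩,
      fun p q hp hq hqp => hoff p q hp hq (by omega)⟩
    · have : p = q := by omega
      subst this
      obtain ⟨e1, e2⟩ := hdiag p hp
      exact ⟨by rw [e1, mbV_diag], by rw [e2, mbV_diag]⟩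
    · exact hoff p q hp hq (by omega)
  have := outerB cost (is_nand == is_dnf) cost.length ((cost.length + 1) - 2) 2
    (initSt cost).1 (initSt cost).2 le_rfl rfl (by rw [show (2 : Nat) - 1 = 1 from rfl]; exact hO1)
  simpa using this

-- tables with equal shape and equal cells are equal
lemma tables_ext {m1 m2 : List (List Int)} {n : Nat}
    (h1 : shapeN m1 n) (h2 : shapeN m2 n)
    (h : ∀ p q, p < n → q < n → cellT m1 p q = cellT m2 p q) : m1 = m2 := by
  apply List.ext_getElem (by rw [h1.1, h2.1])
  intro p hp1 hp2
  have hr1 : m1[p].length = n := h1.2 _ (List.getElem_mem hp1)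
  have hr2 : m2[p].length = n := h2.2 _ (List.getElem_mem hp2)
  apply List.ext_getElem (by rw [hr1, hr2])
  intro q hq1 hq2
  have hcell := h p q (by rw [← h1.1]; exact hp1) (by rw [← hr1]; exact hq1)
  unfold cellT at hcell
  rwa [List.getD_eq_getElem _ _ hp1, List.getD_eq_getElem _ _ hp2,
       List.getD_eq_getElem _ _ hq1, List.getD_eq_getElem _ _ hq2] at hcell

-- ===== VERDICT (by name: the statement is the Claim_ definition above) =====
theorem second_layer_spec : Claim_equal_second_layer := by
  intro cost is_nand is_dnf hdom hpre
  unfold Spec_second_layer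
  have hn : 1 ≤ cost.length := List.length_pos_iff.2 hpre
  obtain ⟨hs1, hs2, hdiag, hoff⟩ := initSt_main cost
  have post := minA_main cost (is_nand == is_dnf) cost.length cost.length 0 (cost.length - 1)
    (initSt cost).1 (initSt cost).2 (by omega) (by omega) (by omega) hs1 hs2
    (initSt_preTT cost (is_nand == is_dnf) hpre)
  have hcast : ((cost.length - 1 : Nat) : Int) = (cost.length : Int) - 1 := by omega
  rw [hcast, Nat.cast_zero] at post
  obtain ⟨hv, hsA1, hsA2, htriA, hunA⟩ := post
  obtain ⟨hsB1, hsB2, hBeq, hBlow⟩ := altB_main cost is_nand is_dnf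
  have hAeq : second_layer cost is_nand is_dnf =
      ((minimize_util cost.length 0 ((cost.length : Int) - 1)
          (initSt cost).1 (initSt cost).2 (is_nand == is_dnf)).2.2,
       (minimize_util cost.length 0 ((cost.length : Int) - 1)
          (initSt cost).1 (initSt cost).2 (is_nand == is_dnf)).2.1) := rfl
  rw [hAeq]
  have hbt : (minimize_util cost.length 0 ((cost.length : Int) - 1)
      (initSt cost).1 (initSt cost).2 (is_nand == is_dnf)).2.2
      = (second_layer_alt cost is_nand is_dnf).1 := by
    apply tables_ext hsA2 hsB2
    intro p q hp hq
    rcases Nat.lt_or_ge q p with hqp | hpq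
    · rw [(hunA p q (by omega)).2, (hBlow p q hp hq hqp).2,
          (hoff p q hp hq (by omega)).2]
    · rw [(htriA p q (by omega) hpq (by omega)).2, (hBeq p q hp hq hpq).2]
  have hmo : (minimize_util cost.length 0 ((cost.length : Int) - 1)
      (initSt cost).1 (initSt cost).2 (is_nand == is_dnf)).2.1
      = (second_layer_alt cost is_nand is_dnf).2 := by
    apply tables_ext hsA1 hsB1
    intro p q hp hq
    rcases Nat.lt_or_ge q p with hqp | hpq
    · rw [(hunA p q (by omega)).1, (hBlow p q hp hq hqp).1,
          (hoff p q hp hq (by omega)).1]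
    · rw [(htriA p q (by omega) hpq (by omega)).1, (hBeq p q hp hq hpq).1]
  rw [hbt, hmo]
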